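-- pv_equiv track=rewrite | github.com/MatheusRDM/management-project | performance/utils_performance.py | _encontrar_sheet
-- ===== SOURCE A (Python) =====
-- def _encontrar_sheet(sheets: list, prefixos: list, sufixos: list) -> str | None:
--     """Encontra sheet que contenha qualquer prefixo E qualquer sufixo (case-insensitive)."""
--     for s in sheets:
--         sl = s.lower().replace(" ", "").replace("-", "")
--         for p in prefixos:
--             pl = p.lower().replace(" ", "").replace("-", "")
--             for sf in sufixos:
--                 if pl in sl and sf in sl:
--                     return s
--     # fallback: apenas sufixo
--     for s in sheets:
--         sl = s.lower()
--         if any(sf in sl for sf in sufixos):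
--             return s
--     return None
-- ===== SOURCE B (Python) =====
-- def _encontrar_sheet(sheets: list, prefixos: list, sufixos: list) -> str | None:
--     """Single pass over sheets with a fallback accumulator: return immediately on
--     the first sheet matching some prefix AND some suffix; remember the first
--     suffix-only sheet and return it at the end if no full match was found."""
--     pls = [p.lower().replace(" ", "").replace("-", "") for p in prefixos]
--     fallback = None
--     for s in sheets:
--         sl = s.lower().replace(" ", "").replace("-", "")
--         if any(pl in sl for pl in pls) and any(sf in sl for sf in sufixos):
--             return s
--         if fallback is None and any(sf in s.lower() for sf in sufixos):
--             fallback = s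
--     return fallback
-- ===== Notes on version B (the rewrite author's own statement) =====
-- stated objective: alternative
-- what changed: Replaces A's two staged passes over the sheets (triple nested full-match pass, then a separate fallback pass) by a single pass with a fallback accumulator: return at the first full match, remember the first suffix-only sheet, return it at the end; normalized prefixes are computed once.
import Mathlib
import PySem

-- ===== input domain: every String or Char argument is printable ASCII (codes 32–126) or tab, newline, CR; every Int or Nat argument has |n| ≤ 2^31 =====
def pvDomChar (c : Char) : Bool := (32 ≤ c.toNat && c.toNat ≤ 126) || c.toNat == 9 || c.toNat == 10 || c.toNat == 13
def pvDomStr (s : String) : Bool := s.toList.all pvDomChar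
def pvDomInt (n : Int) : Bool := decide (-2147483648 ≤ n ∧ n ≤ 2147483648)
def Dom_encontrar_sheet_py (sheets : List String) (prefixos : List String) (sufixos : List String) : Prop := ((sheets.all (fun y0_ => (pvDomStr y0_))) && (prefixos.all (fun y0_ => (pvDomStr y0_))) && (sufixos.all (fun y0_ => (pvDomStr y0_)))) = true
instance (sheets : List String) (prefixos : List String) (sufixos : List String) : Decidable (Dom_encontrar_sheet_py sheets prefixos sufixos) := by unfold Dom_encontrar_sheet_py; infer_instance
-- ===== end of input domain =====

-- B replaces A's two staged passes over the sheets by a single pass with a fallback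
-- accumulator (return at the first full match, remember the first suffix-only sheet),
-- with normalized prefixes computed once (objective: alternative decomposition).

-- ===== PORT A =====
-- s.lower().replace(" ", "").replace("-", "")
def pvNorm (s : String) : String :=
  PySem.Str.replace (PySem.Str.replace (PySem.Str.lower s) " " "") "-" ""

-- innermost loop: for sf in sufixos: if pl in sl and sf in sl: return s
def pvALoopSf (sl s pl : String) (sufixos : List String) : Option String :=
  match sufixos with
  | [] => none
  | sf :: rest =>
      if PySem.Str.isIn pl sl && PySem.Str.isIn sf sl then some s
      else pvALoopSf sl s pl rest

-- middle loop: for p in prefixos: pl = norm(p); <inner loop>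
def pvALoopP (sl s : String) (prefixos sufixos : List String) : Option String :=
  match prefixos with
  | [] => none
  | p :: rest =>
      match pvALoopSf sl s (pvNorm p) sufixos with
      | some r => some r
      | none => pvALoopP sl s rest sufixos

-- outer loop (first pass): for s in sheets: sl = norm(s); <middle loop>
def pvALoopS (sheets prefixos sufixos : List String) : Option String :=
  match sheets with
  | [] => none
  | s :: rest =>
      match pvALoopP (pvNorm s) s prefixos sufixos with
      | some r => some r
      | none => pvALoopS rest prefixos sufixos

-- second pass: for s in sheets: if any(sf in s.lower() for sf in sufixos): return s
def pvAFallback (sheets sufixos : List String) : Option String :=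
  match sheets with
  | [] => none
  | s :: rest =>
      if sufixos.any (fun sf => PySem.Str.isIn sf (PySem.Str.lower s)) then some s
      else pvAFallback rest sufixos

def encontrar_sheet_py (sheets : List String) (prefixos : List String) (sufixos : List String) : Option String :=
  match pvALoopS sheets prefixos sufixos with
  | some r => some r
  | none => pvAFallback sheets sufixos

-- ===== PORT B =====
-- one pass over sheets carrying the fallback accumulator `fb`
def pvBGo (sheets : List String) (pls sufixos : List String) (fb : Option String) : Option String :=
  match sheets with
  | [] => fb
  | s :: rest =>
      let sl := pvNorm s
      if pls.any (fun pl => PySem.Str.isIn pl sl) && sufixos.any (fun sf => PySem.Str.isIn sf sl)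
      then some s
      else
        pvBGo rest pls sufixos
          (if fb.isNone && sufixos.any (fun sf => PySem.Str.isIn sf (PySem.Str.lower s))
           then some s else fb)

def encontrar_sheet_py_alt (sheets : List String) (prefixos : List String) (sufixos : List String) : Option String :=
  pvBGo sheets (prefixos.map pvNorm) sufixos none

-- ===== PRECONDITION & SPEC =====
def Spec_encontrar_sheet_py (sheets : List String) (prefixos : List String) (sufixos : List String) (out : Option String) : Prop := out = encontrar_sheet_py_alt sheets prefixos sufixos
instance (sheets : List String) (prefixos : List String) (sufixos : List String) (out : Option String) : Decidable (Spec_encontrar_sheet_py sheets prefixos sufixos out) := by unfold Spec_encontrar_sheet_py; infer_instance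

-- ===== CLAIM (what is proved, stated in full; the proofs are below) =====
def Claim_equal_encontrar_sheet_py : Prop := ∀ (sheets : List String) (prefixos : List String) (sufixos : List String), Dom_encontrar_sheet_py sheets prefixos sufixos → Spec_encontrar_sheet_py sheets prefixos sufixos (encontrar_sheet_py sheets prefixos sufixos)

-- ===== LEMMAS AND PROOFS =====

theorem pvOptIfOr (a b c : Bool) (s : String) :
    (if (a && b) = true then some s else if (a && c) = true then some s else none) =
      if (a && (b || c)) = true then some s else none := by
  cases a <;> cases b <;> cases c <;> simp

theorem pvOptMatchOr (a b c : Bool) (s : String) :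
    (match (if (a && c) = true then some s else none : Option String) with
      | some r => some r
      | none => if (b && c) = true then some s else none) =
      if ((a || b) && c) = true then some s else none := by
  cases a <;> cases b <;> cases c <;> simp

-- A's innermost loop returns `some s` iff pl matches and some suffix matches
theorem pvALoopSf_eq (sl s pl : String) (sufixos : List String) :
    pvALoopSf sl s pl sufixos =
      if PySem.Str.isIn pl sl && sufixos.any (fun sf => PySem.Str.isIn sf sl) then some s else none := by
  induction sufixos with
  | nil => simp [pvALoopSf]
  | cons sf rest ih =>
      simp only [pvALoopSf, ih, List.any_cons]
      exact pvOptIfOr _ _ _ s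

-- A's middle loop tests prefix-existence and suffix-existence independently
theorem pvALoopP_eq (sl s : String) (prefixos sufixos : List String) :
    pvALoopP sl s prefixos sufixos =
      if prefixos.any (fun p => PySem.Str.isIn (pvNorm p) sl)
         && sufixos.any (fun sf => PySem.Str.isIn sf sl)
      then some s else none := by
  induction prefixos with
  | nil => simp [pvALoopP]
  | cons p rest ih =>
      simp only [pvALoopP, pvALoopSf_eq, ih, List.any_cons]
      exact pvOptMatchOr _ _ _ s

-- B's single pass equals A's first pass, falling back to `fb` then to A's second pass
theorem pvBGo_eq (sheets prefixos sufixos : List String) (fb : Option String) :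
    pvBGo sheets (prefixos.map pvNorm) sufixos fb =
      match pvALoopS sheets prefixos sufixos with
      | some r => some r
      | none =>
          match fb with
          | some f => some f
          | none => pvAFallback sheets sufixos := by
  induction sheets generalizing fb with
  | nil => cases fb <;> rfl
  | cons s rest ih =>
      simp only [pvBGo, pvALoopS, pvALoopP_eq, pvAFallback, List.any_map, Function.comp_def]
      cases h : ((prefixos.any fun p => PySem.Str.isIn (pvNorm p) (pvNorm s))
          && (sufixos.any fun sf => PySem.Str.isIn sf (pvNorm s))) with
      | true => rfl
      | false =>
          simp only [Bool.false_eq_true, if_false, ih]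
          cases fb with
          | some f => rfl
          | none =>
              cases hs : (sufixos.any fun sf => PySem.Str.isIn sf (PySem.Str.lower s)) with
              | true => simp only [Option.isNone_none, Bool.true_and, if_true]
              | false => simp only [Option.isNone_none, Bool.true_and, Bool.false_eq_true, if_false]

-- ===== VERDICT (by name: the statement is the Claim_ definition above) =====
theorem encontrar_sheet_py_spec : Claim_equal_encontrar_sheet_py := by
  intro sheets prefixos sufixos _
  unfold Spec_encontrar_sheet_py encontrar_sheet_py encontrar_sheet_py_alt
  rw [pvBGo_eq]
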